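/- GENERATED by mk_final_copies.py from the proof of the farm's unit `start_decoder.R10a` (farm:start_decoder.R10a.1: Proof.lean) as the
   re-elaboration sweep compiled it — do not edit. -/
import Asan.CheckWalk
import Vorbis.Spec.Units.start_decoder_R10a

open X86 X86.User Asan Vorbis Vorbis.Spec Vorbis.Spec.StartDecoder

set_option maxRecDepth 4000
set_option maxHeartbeats 4000000

namespace Vorbis.Spec.start_decoder_R10a

/-- **Segment R10a of `start_decoder`** (`pc_R10` 0x116380 … 0x116385 → the head `cut296` 0x116351): `r13d = dword [R + 24H]` = Z24 = 0,
the counter of loop 4110, `jmp` to the head. No memory change: the loop record is carried with the new program counter by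
`MapLoop.carry` over the empty footprint; `BodyR10` with r13 = 0 is the point of R10 with no coupling step finished (`R10.of_body`'s
content, at the head's address). -/
theorem segR10a_walk {Lay : Layout} (hLay : Lay.hi = 0x1000000) {μ : Microarch} (hμ : UserX.MicroOK μ) {u₀ : State}
    (hcode : HasCodeNat Lay u₀ Vorbis.L.start_decoder.entry Vorbis.Code.code_start_decoder.nat Vorbis.L.start_decoder.size)
    {g : Ghost} {i : Nat} {v : State} {A7 A7c Ai : Arena} {A : Arena × List Obj} (hb : BodyR10 u₀ g i A7 A7c Ai A v) :
    ReachVia Lay μ WayInv v (fun w => AtR10h u₀ g i 0 w) := by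
  have hl := hb.loop
  have hfr := hl.frame
  have hm := hl.mid
  have he := hfr.entry
  v_entry he
  obtain ⟨hRa, hR8⟩ := hfr.r_eq
  simp only [steady, Ghost.RA] at hRa
  simp only [depth] at he_room he_stack
  have hRn : (addr g.R).toNat = g.R := toNat_addr _ (by omega)
  have w_rip := hfr.rip
  have c_rsp := hfr.rsp
  have c_rbp := hl.rbp
  have w_eq : Mem.EqOn Vorbis.L.textLo Vorbis.L.textHi u₀.mem v.mem := hfr.code
  have hdf : v.flags .df = false := (show abiInv _ from hfr.inv).1
  have hmx : v.mxcsr &&& 0x1F80 = 0x1F80 := (show abiInv _ from hfr.inv).2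
  have hsse := Vorbis.sseOK_of_abiInv hfr.inv
  u_walk hcode [hμ.vendor] until [Vorbis.L.start_decoder.cut296] span [Vorbis.L.textLo, Vorbis.L.textHi] side (v_side)
  -- 0x116380 `mov r13d, [rsp + 24H]`, 0x116385 `jmp 116351`: the memory is that of `v`, r13 = Z24 = 0
  have hz24 : v.mem.readLE (addr g.R + 36) 4 = 0 := by
    have h0 := hm.consts.z24 (by omega) (by omega)
    unfold Mem.u32 at h0
    rw [← addr_add_lit] at h0
    exact h0
  have hr13 : s_116385.reg .r13 = addr 0 := by
    rw [w_r13, hz24]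
    rfl
  have habi : abiInv s_116385 := by
    refine Vorbis.abiInv_of ?_ ?_
    · rw [w_flags]
      exact hdf
    · rw [w_mxcsr]
      exact hmx
  have hs : Mem.SameExcept [] v.mem s_116385.mem := by
    rw [w_mem]
    exact Mem.SameExcept.refl _ _
  have hun : ShadowUntouched v.mem s_116385.mem := by
    rw [w_mem]
    exact fun _ _ _ => rfl
  have hrsp : s_116385.reg .rsp = addr g.R := by
    rw [w_kept.get .rsp rfl]
    exact c_rsp
  have hbits : Bits (g.Blk A) g.len s_116385.mem g.f := by
    rw [w_mem]
    exact hm.bits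
  have hl' : MapLoop u₀ g Vorbis.L.start_decoder.cut296 i A7 A7c Ai A s_116385 :=
    hl.carry hb.cur.lt hs hun (fun x hx => absurd hx List.not_mem_nil) hbits w_rip hrsp w_eq habi
      (by rw [w_kept.get .rbp rfl])
  have hrbx : s_116385.reg .rbx = addr (mapAt g s_116385.mem i) := by
    rw [w_kept.get .rbx rfl, w_mem]
    exact hb.rbx
  have hcur : MapCur g (Since Ai A.1) s_116385.mem i 10 := by
    rw [w_mem]
    exact hb.cur
  refine ReachVia.done ⟨A7, A7c, Ai, A, ?_⟩
  exact
    { loop := hl'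
      rbx := hrbx
      cur := hcur
      r13 := hr13
      k_le := Nat.zero_le _
      done := fun k' hk' => absurd hk' (Nat.not_lt_zero k') }

end Vorbis.Spec.start_decoder_R10a

/-- The unit `start_decoder.R10a`: `segR10a_walk` at every entry state. -/
theorem Vorbis.Spec.Worked.start_decoder_R10a_ok : Vorbis.Spec.start_decoder_R10a.Statement := by
  intro Lay hLay μ hμ u₀ hcode g i v hat
  obtain ⟨A7, A7c, Ai, A, hb⟩ := hat
  exact Vorbis.Spec.start_decoder_R10a.segR10a_walk hLay hμ hcode hb
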